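-- pv_equiv track=rewrite | github.com/pypi-data/pypi-mirror-139 | packages/robotframework-historic2/robotframework-historic2-0.0.1.tar.gz/robotframework-historic2-0.0.1/robotframework_historic2/app.py | sort_tests
-- ===== SOURCE A (Python) =====
-- def sort_tests(data_list):
--     out = {}
--     for elem in data_list:
--         try:
--             out[elem[0]].extend(elem[1:])
--         except KeyError:
--             out[elem[0]] = list(elem)
--     return [tuple(values) for values in out.values()]
-- ===== SOURCE B (Python) =====
-- def sort_tests(data_list):
--     result = []
--     for i, row in enumerate(data_list):
--         key = row[0]
--         if any(prev[0] == key for prev in data_list[:i]):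
--             continue  # not the first occurrence of this key
--         merged = list(row)
--         for later in data_list[i + 1:]:
--             if later[0] == key:
--                 merged.extend(later[1:])
--         result.append(tuple(merged))
--     return result
-- ===== Notes on version B (the rewrite author's own statement) =====
-- stated objective: alternative
-- what changed: A groups in one pass through an insertion-ordered dict; B uses no dict at all: for each row it scans the prefix to decide whether it is the first occurrence of its key and, if so, scans the suffix to collect the tails of the matching later rows (nested scans, trading A's hash lookups for quadratic list scans).
import Mathlib
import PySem

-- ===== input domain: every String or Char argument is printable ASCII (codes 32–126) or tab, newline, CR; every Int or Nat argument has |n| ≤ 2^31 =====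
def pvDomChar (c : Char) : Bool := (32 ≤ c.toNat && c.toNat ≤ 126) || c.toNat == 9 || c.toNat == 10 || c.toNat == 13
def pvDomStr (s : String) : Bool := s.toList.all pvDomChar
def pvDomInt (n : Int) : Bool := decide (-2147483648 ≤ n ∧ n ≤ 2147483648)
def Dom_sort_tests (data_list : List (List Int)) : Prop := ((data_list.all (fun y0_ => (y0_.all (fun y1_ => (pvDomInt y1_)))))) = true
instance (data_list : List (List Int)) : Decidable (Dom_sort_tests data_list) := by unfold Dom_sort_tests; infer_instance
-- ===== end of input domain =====

-- B drops A's dict entirely: for each row it scans the prefix to decide first occurrence of its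
-- key and scans the suffix to collect matching tails (objective: alternative algorithm, not faster).

-- ===== PORT A =====
-- the body of A's for-loop (try extend / except create)
def aStep (out : PySem.Dict Int (List Int)) (elem : List Int) : PySem.Dict Int (List Int) :=
  match elem with
  | [] => out            -- Python raises IndexError on elem[0]; excluded by Pre_
  | k :: rest =>
    match out.get? k with
    | some v => out.insert k (v ++ rest)     -- out[elem[0]].extend(elem[1:])
    | none   => out.insert k (k :: rest)     -- out[elem[0]] = list(elem)

def sort_tests (data_list : List (List Int)) : List (List Int) :=
  (data_list.foldl aStep PySem.Dict.empty).values

-- ===== PORT B =====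
-- Source B's loop over enumerate(data_list): `seen` is the prefix data_list[:i], `rest` the suffix from i
def altLoop (seen : List (List Int)) (rest : List (List Int)) : List (List Int) :=
  match rest with
  | [] => []
  | row :: tl =>
    match row with
    | [] => altLoop (seen ++ [row]) tl   -- Python raises IndexError on row[0]; excluded by Pre_
    | k :: _ =>
      if seen.any (fun prev => prev.head? == some k) then
        altLoop (seen ++ [row]) tl       -- not the first occurrence: continue
      else
        (tl.foldl (fun acc later => if later.head? == some k then acc ++ later.drop 1 else acc) row)
          :: altLoop (seen ++ [row]) tl

def sort_tests_alt (data_list : List (List Int)) : List (List Int) :=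
  altLoop [] data_list

-- ===== PRECONDITION & SPEC =====
-- Pre_ excludes inputs containing an empty row, on which A (and B) raise IndexError at elem[0].
def Pre_sort_tests (data_list : List (List Int)) : Prop := ∀ row ∈ data_list, row ≠ []
instance (data_list : List (List Int)) : Decidable (Pre_sort_tests data_list) := by unfold Pre_sort_tests; infer_instance
def pvWitness_sort_tests : List (List Int) := [[1, 2], [1, 3, 4], [2, 5], [1, 6]]

def Spec_sort_tests (data_list : List (List Int)) (out : List (List Int)) : Prop := out = sort_tests_alt data_list
instance (data_list : List (List Int)) (out : List (List Int)) : Decidable (Spec_sort_tests data_list out) := by unfold Spec_sort_tests; infer_instance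

-- ===== CLAIM (what is proved, stated in full; the proofs are below) =====
def Claim_equal_sort_tests : Prop := ∀ (data_list : List (List Int)), Dom_sort_tests data_list → Pre_sort_tests data_list → Spec_sort_tests data_list (sort_tests data_list)

-- ===== LEMMAS AND PROOFS =====

-- the tails of all rows of l whose first element is k
def tailsOf (k : Int) (l : List (List Int)) : List Int :=
  (l.filter (fun r => r.head? == some k)).flatMap (fun r => r.drop 1)

-- the common intermediate form: the (key, merged row) pairs produced for keys not in ks,
-- in first-occurrence order
def fresh (ks : List Int) (rest : List (List Int)) : List (Int × List Int) :=
  match rest with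
  | [] => []
  | [] :: tl => fresh ks tl
  | (k :: rs) :: tl =>
    if ks.contains k then fresh ks tl
    else (k, (k :: rs) ++ tailsOf k tl) :: fresh (ks ++ [k]) tl

theorem tailsOf_cons (k : Int) (r : List Int) (tl : List (List Int)) :
    tailsOf k (r :: tl) =
      (if r.head? == some k then r.drop 1 else []) ++ tailsOf k tl := by
  by_cases h : (r.head? == some k) = true <;> simp [tailsOf, h]

-- fresh depends on ks only through membership
theorem fresh_congr (tl : List (List Int)) (ks ks' : List Int)
    (h : ∀ j, ks.contains j = ks'.contains j) : fresh ks tl = fresh ks' tl := by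
  induction tl generalizing ks ks' with
  | nil => rfl
  | cons r tl ih =>
    cases r with
    | nil => exact ih ks ks' h
    | cons k rs =>
      have h' : ∀ j, (ks ++ [k]).contains j = (ks' ++ [k]).contains j := by
        intro j
        rw [List.contains_append, List.contains_append, h j]
      simp only [fresh, h k]
      by_cases hk : ks'.contains k = true
      · simp only [hk, if_pos]
        exact ih ks ks' h
      · simp only [hk, Bool.false_eq_true, if_neg, not_false_eq_true,
          List.cons.injEq, true_and]
        exact ih (ks ++ [k]) (ks' ++ [k]) h' 

theorem contains_snoc_self (ks : List Int) (k : Int) (h : ks.contains k = true) :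
    ∀ j, (ks ++ [k]).contains j = ks.contains j := by
  intro j
  rw [List.contains_append]
  by_cases hj : j = k
  · subst hj
    rw [h]
    simp
  · have hk1 : ([k].contains j) = false := by simp [hj]
    rw [hk1, Bool.or_false]

-- Source B's inner merge loop appends exactly the matching tails
theorem merge_foldl (k : Int) (tl : List (List Int)) (row : List Int) :
    tl.foldl (fun acc later => if later.head? == some k then acc ++ later.drop 1 else acc) row
      = row ++ tailsOf k tl := by
  induction tl generalizing row with
  | nil => simp [tailsOf]
  | cons r tl ih =>
    rw [List.foldl_cons, ih, tailsOf_cons]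
    by_cases h : (r.head? == some k) = true <;> simp [h]

-- the prefix-membership test of Source B equals membership of k among the heads of the prefix
theorem any_head_eq (seen : List (List Int)) (k : Int) :
    seen.any (fun prev => prev.head? == some k)
      = (seen.filterMap List.head?).contains k := by
  induction seen with
  | nil => rfl
  | cons r tl ih =>
    cases r with
    | nil =>
      simp only [List.any_cons, List.filterMap_cons, List.head?_nil]
      simpa using ih
    | cons x xs =>
      simp only [List.any_cons, List.filterMap_cons, List.head?_cons, List.contains_cons, ih]
      congr 1
      by_cases h : x = k
      · subst h; simp
      · simp [h, Ne.symm h]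

-- B computes the merged rows of `fresh`
theorem altLoop_eq_fresh (rest : List (List Int)) (seen : List (List Int)) :
    altLoop seen rest = (fresh (seen.filterMap List.head?) rest).map Prod.snd := by
  induction rest generalizing seen with
  | nil => rfl
  | cons row tl ih =>
    cases row with
    | nil =>
      have h1 : (seen ++ [([] : List Int)]).filterMap List.head? = seen.filterMap List.head? := by
        simp
      show altLoop (seen ++ [[]]) tl = (fresh (seen.filterMap List.head?) tl).map Prod.snd
      rw [ih (seen ++ [[]]), h1]
    | cons k rs =>
      have hsnoc : (seen ++ [k :: rs]).filterMap List.head?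
          = seen.filterMap List.head? ++ [k] := by simp
      show (if (seen.any fun prev => prev.head? == some k) = true then
              altLoop (seen ++ [k :: rs]) tl
            else
              (tl.foldl (fun acc later =>
                  if later.head? == some k then acc ++ later.drop 1 else acc) (k :: rs))
                :: altLoop (seen ++ [k :: rs]) tl)
          = ((if (seen.filterMap List.head?).contains k = true then
                fresh (seen.filterMap List.head?) tl
              else
                (k, (k :: rs) ++ tailsOf k tl)
                  :: fresh (seen.filterMap List.head? ++ [k]) tl).map Prod.snd)
      rw [any_head_eq]
      by_cases h : (seen.filterMap List.head?).contains k = true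
      · rw [if_pos h, if_pos h, ih (seen ++ [k :: rs]), hsnoc,
          fresh_congr tl _ _ (contains_snoc_self _ _ h)]
      · rw [if_neg h, if_neg h, merge_foldl, List.map_cons, ih (seen ++ [k :: rs]), hsnoc]

-- loop invariant for A: processing `rest` extends every existing entry with the matching
-- tails of `rest` and appends the `fresh` entries for the keys not yet present
theorem aLoop_items (rest : List (List Int)) (d : PySem.Dict Int (List Int))
    (hrows : ∀ row ∈ rest, row ≠ []) (hnd : d.keys.Nodup) :
    (rest.foldl aStep d).items
      = d.items.map (fun p => (p.1, p.2 ++ tailsOf p.1 rest)) ++ fresh d.keys rest := by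
  induction rest generalizing d with
  | nil => simp [tailsOf, fresh]
  | cons row tl ih =>
    rcases hr : row with _ | ⟨k, rs⟩
    · exact absurd hr (hrows row List.mem_cons_self)
    have htl : ∀ r ∈ tl, r ≠ [] := fun r hr' => hrows r (List.mem_cons_of_mem _ hr')
    simp only [List.foldl_cons, aStep]
    rcases hg : d.get? k with _ | v
    · -- new key: entry appended at the end
      have hc : d.contains k = false := by
        rw [PySem.Dict.contains_eq_isSome_get?, hg]; rfl
      have hkmem : k ∉ d.keys := (PySem.Dict.get?_eq_none_iff_not_mem_keys d k).mp hg
      have hkeys : (d.insert k (k :: rs)).keys = d.keys ++ [k] :=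
        PySem.Dict.keys_insert_of_not_contains d (k :: rs) hc
      have hnd' : (d.insert k (k :: rs)).keys.Nodup := by
        have hdisj : d.keys.Disjoint [k] := by
          intro a ha hb
          rw [List.mem_singleton] at hb
          exact hkmem (hb ▸ ha)
        rw [hkeys]
        exact hnd.append (List.nodup_singleton k) hdisj
      rw [ih _ htl hnd', PySem.Dict.items_insert_of_not_contains d (k :: rs) hc, hkeys]
      have hck : d.keys.contains k = false := by simpa using hkmem
      simp only [fresh, hck, Bool.false_eq_true, if_neg, not_false_eq_true,
        List.map_append, List.map_cons, List.map_nil]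
      have hmap : d.items.map (fun p => (p.1, p.2 ++ tailsOf p.1 ((k :: rs) :: tl)))
          = d.items.map (fun p => (p.1, p.2 ++ tailsOf p.1 tl)) := by
        apply List.map_congr_left
        intro p hp
        have hpk : p.1 ≠ k := by
          intro hpe
          exact hkmem (hpe ▸ PySem.Dict.mem_keys_of_mem_items d hp)
        rw [tailsOf_cons]
        simp [Ne.symm hpk]
      rw [hmap]
      simp
    · -- existing key: entry replaced in place
      have hc : d.contains k = true := by
        rw [PySem.Dict.contains_eq_isSome_get?, hg]; rfl
      have hkmem : k ∈ d.keys := (PySem.Dict.contains_iff_mem_keys d k).mp hc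
      have hkeys : (d.insert k (v ++ rs)).keys = d.keys :=
        PySem.Dict.keys_insert_of_contains d (v ++ rs) hc
      rw [ih _ htl (hkeys ▸ hnd), PySem.Dict.items_insert_of_contains d (v ++ rs) hc, hkeys]
      have hck : d.keys.contains k = true := by simpa using hkmem
      simp only [fresh, hck, if_pos, List.map_map]
      congr 1
      apply List.map_congr_left
      intro p hp
      by_cases hpk : p.1 = k
      · have hv : p.2 = v := by
          have hgp := PySem.Dict.get?_of_mem_items d
            (show (p.1, p.2) ∈ d.items by simpa using hp) hnd
          rw [hpk, hg] at hgp
          exact (Option.some.inj hgp).symm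
        simp only [Function.comp_apply, hpk, beq_self_eq_true, if_pos, hv, tailsOf_cons]
        simp [List.append_assoc]
      · have hbk : (p.1 == k) = false := by simpa using hpk
        simp only [Function.comp_apply, hbk, Bool.false_eq_true, if_neg, not_false_eq_true,
          tailsOf_cons]
        simp [Ne.symm hpk]

-- ===== VERDICT (by name: the statement is the Claim_ definition above) =====
theorem sort_tests_spec : Claim_equal_sort_tests := by
  intro dl _ hpre
  unfold Spec_sort_tests sort_tests sort_tests_alt
  rw [altLoop_eq_fresh dl []]
  have h := aLoop_items dl PySem.Dict.empty hpre (by simp)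
  simp only [PySem.Dict.values, h]
  simp [PySem.Dict.empty]
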